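-- pv_equiv track=rewrite | github.com/khm1102/BOJ | 프로그래머스/5/214292. 재밌는 레이싱 경기장 설계하기/재밌는 레이싱 경기장 설계하기.py | solution
-- ===== SOURCE A (Python) =====
-- def solution(heights):
--     heights.sort()
--     arr = []
--     if len(heights) % 2 == 1:
--         for i in range(len(heights) // 2):
--             arr.append(heights[i + len(heights) // 2] - heights[i])
--         arr.append(heights[-1] - heights[len(heights) // 2])
--         arr.sort()
--         return arr[1]
--     else:
--         for i in range(len(heights) // 2):
--             arr.append(heights[i + len(heights) // 2] - heights[i])
--         arr.sort()
--         return arr[0]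
-- ===== SOURCE B (Python) =====
-- def solution(heights):
--     # Sorts `heights` in place, like the original.
--     heights.sort()
--     n = len(heights)
--     half = n // 2
--     diffs = [heights[i + half] - heights[i] for i in range(half)]
--     if n % 2 == 1:
--         diffs.append(heights[-1] - heights[half])
--     m1 = m2 = None
--     for d in diffs:
--         if m1 is None or d < m1:
--             m1, m2 = d, m1
--         elif m2 is None or d < m2:
--             m2 = d
--     return m1 if n % 2 == 0 else m2
-- ===== Notes on version B (the rewrite author's own statement) =====
-- stated objective: alternative
-- what changed: B keeps the sort of heights and the same pairing of differences, but replaces collecting all differences into a list and sorting it (to take element 0 or 1) by a single pass that tracks the smallest and second-smallest difference.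
-- outside the precondition, e.g. on solution([]): A raises IndexError, B returns None; on solution([5]): A raises IndexError, B returns None
import Mathlib
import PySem

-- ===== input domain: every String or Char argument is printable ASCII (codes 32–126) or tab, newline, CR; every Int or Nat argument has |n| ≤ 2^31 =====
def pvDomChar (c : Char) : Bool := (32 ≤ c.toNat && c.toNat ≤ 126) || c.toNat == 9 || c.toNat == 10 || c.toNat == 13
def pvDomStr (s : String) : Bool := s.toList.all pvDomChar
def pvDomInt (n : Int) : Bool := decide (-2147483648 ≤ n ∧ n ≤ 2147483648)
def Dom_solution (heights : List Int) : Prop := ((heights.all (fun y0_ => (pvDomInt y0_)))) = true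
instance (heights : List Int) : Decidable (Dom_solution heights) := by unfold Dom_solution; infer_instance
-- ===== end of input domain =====

-- B replaces A's collect-all-differences-then-sort step by a single pass tracking the
-- smallest and second-smallest difference (objective: simpler/alternative; same sort of
-- the heights). Both Pythons sort `heights` in place; the claim is about the return value.

-- ===== PORT A =====
-- Literal port of A.  `pyGetD … 0` = Python indexing (all indices used are in range);
-- `(pyGet? … ).getD 0` = arr[0]/arr[1], whose IndexError (len < 2) is excluded by Pre_.
def solution (heights : List Int) : Int :=
  let hs := PySem.List.sorted heights (fun x => x) false
  let n : Int := hs.length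
  if n % 2 = 1 then
    let arr := (PySem.List.pyRange 0 (n / 2) 1).foldl
      (fun acc i => acc ++ [PySem.List.pyGetD hs (i + n / 2) 0 - PySem.List.pyGetD hs i 0]) []
    let arr := arr ++ [PySem.List.pyGetD hs (-1) 0 - PySem.List.pyGetD hs (n / 2) 0]
    (PySem.List.pyGet? (PySem.List.sorted arr (fun x => x) false) 1).getD 0
  else
    let arr := (PySem.List.pyRange 0 (n / 2) 1).foldl
      (fun acc i => acc ++ [PySem.List.pyGetD hs (i + n / 2) 0 - PySem.List.pyGetD hs i 0]) []
    (PySem.List.pyGet? (PySem.List.sorted arr (fun x => x) false) 0).getD 0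

-- ===== PORT B =====
-- One step of B's scan: state = (m1, m2) = smallest / second-smallest so far (None = not yet).
def pvStep (s : Option Int × Option Int) (d : Int) : Option Int × Option Int :=
  match s with
  | (none, _) => (some d, none)
  | (some m1, m2) =>
    if d < m1 then (some d, some m1)
    else match m2 with
      | none => (some m1, some d)
      | some m2v => if d < m2v then (some m1, some d) else (some m1, some m2v)

-- Literal port of B (Source B).  `.getD 0` stands for Python's `None` result, which is
-- unreachable under Pre_ (it needs fewer than the required number of differences).
def solution_alt (heights : List Int) : Int :=
  let hs := PySem.List.sorted heights (fun x => x) false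
  let n : Int := hs.length
  let half := n / 2
  let diffs := (PySem.List.pyRange 0 half 1).map
    (fun i => PySem.List.pyGetD hs (i + half) 0 - PySem.List.pyGetD hs i 0)
  let diffs := if n % 2 = 1 then
      diffs ++ [PySem.List.pyGetD hs (-1) 0 - PySem.List.pyGetD hs half 0]
    else diffs
  let p := diffs.foldl pvStep (none, none)
  if n % 2 = 0 then p.1.getD 0 else p.2.getD 0

-- ===== PRECONDITION & SPEC =====
-- Pre_ excludes exactly the inputs where Python A raises IndexError: the empty list
-- (arr[0] of an empty arr) and a one-element list (arr[1] of a one-element arr).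
def Pre_solution (heights : List Int) : Prop := 2 ≤ heights.length

instance (heights : List Int) : Decidable (Pre_solution heights) := by
  unfold Pre_solution; infer_instance

def pvWitness_solution : List Int := ([3, 1, 7, 4])

def Spec_solution (heights : List Int) (out : Int) : Prop := out = solution_alt heights
instance (heights : List Int) (out : Int) : Decidable (Spec_solution heights out) := by
  unfold Spec_solution; infer_instance

-- ===== CLAIM (what is proved, stated in full; the proofs are below) =====
def Claim_equal_solution : Prop := ∀ (heights : List Int), Dom_solution heights → Pre_solution heights → Spec_solution heights (solution heights)

-- ===== LEMMAS AND PROOFS =====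

-- Shorthand used only by the proofs: a reference sorted order on Int.
def pvIS (L : List Int) : List Int := L.insertionSort (· ≤ ·)

lemma pvSorted_eq_IS (L : List Int) :
    PySem.List.sorted L (fun x => x) false = pvIS L :=
  PySem.List.sorted_id_eq_of_perm_of_pairwise L (pvIS L)
    (List.perm_insertionSort _ L) (List.pairwise_insertionSort _ L)

lemma pvIS_concat (L : List Int) (d : Int) :
    pvIS (L ++ [d]) = List.orderedInsert (· ≤ ·) d (pvIS L) := by
  refine List.Perm.eq_of_pairwise (le := (· ≤ ·)) ?_
    (List.pairwise_insertionSort _ _)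
    (List.Pairwise.orderedInsert (r := (· ≤ ·)) d _ (List.pairwise_insertionSort _ _)) ?_
  · intro a b _ _ h1 h2; omega
  · have h1 : (pvIS (L ++ [d])).Perm (L ++ [d]) := List.perm_insertionSort _ _
    have h2 : (List.orderedInsert (· ≤ ·) d (pvIS L)).Perm (L ++ [d]) := by
      refine (List.perm_orderedInsert _ d _).trans ?_
      exact ((List.perm_insertionSort _ L).cons d).trans (List.perm_append_singleton d L).symm
    exact h1.trans h2.symm

lemma pvStep_sorted (S : List Int) (hS : S.Pairwise (· ≤ ·)) (d : Int) :
    pvStep (S[0]?, S[1]?) d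
      = ((List.orderedInsert (· ≤ ·) d S)[0]?, (List.orderedInsert (· ≤ ·) d S)[1]?) := by
  match S with
  | [] => simp [pvStep, List.orderedInsert]
  | [a] =>
    by_cases h1 : d < a <;> by_cases h2 : d ≤ a <;>
      first
        | omega
        | (simp [List.orderedInsert, pvStep, h1, h2]; try omega)
  | a :: b :: t =>
    have hab : a ≤ b := (List.pairwise_cons.mp hS).1 b (by simp)
    by_cases h1 : d < a <;> by_cases h2 : d ≤ a <;> by_cases h3 : d < b <;> by_cases h4 : d ≤ b <;>
      first
        | omega
        | (simp [List.orderedInsert, pvStep, h1, h2, h3, h4]; try omega)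

lemma pvScan_eq (L : List Int) :
    L.foldl pvStep (none, none) = ((pvIS L)[0]?, (pvIS L)[1]?) := by
  induction L using List.reverseRecOn with
  | nil => rfl
  | append_singleton L d ih =>
    rw [List.foldl_append, List.foldl_cons, List.foldl_nil, ih, pvIS_concat]
    exact pvStep_sorted (pvIS L) (List.pairwise_insertionSort _ _) d

lemma pvFold_eq_map (xs : List Int) (f : Int → Int) :
    xs.foldl (fun acc i => acc ++ [f i]) [] = xs.map f := by
  have h : ∀ acc, xs.foldl (fun acc i => acc ++ [f i]) acc = acc ++ xs.map f := by
    induction xs with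
    | nil => simp
    | cons x xs ih => intro acc; simp [List.foldl_cons, ih]
  simpa using h []

-- ===== VERDICT (by name: the statement is the Claim_ definition above) =====
theorem solution_spec : Claim_equal_solution := by
  intro heights _ _
  unfold Spec_solution
  simp only [solution, solution_alt, pvFold_eq_map, pvSorted_eq_IS, pvScan_eq]
  by_cases h : ((pvIS heights).length : Int) % 2 = 1
  · have h0 : ¬ ((pvIS heights).length : Int) % 2 = 0 := by omega
    simp only [if_pos h, if_neg h0]
    rw [show ((1 : Int)) = ((1 : Nat) : Int) by norm_num, PySem.List.pyGet?_natCast]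
  · have h0 : ((pvIS heights).length : Int) % 2 = 0 := by omega
    simp only [if_neg h, if_pos h0, PySem.List.pyGet?_zero]
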